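-- pv_equiv track=rewrite | github.com/seaniiio/PS | baekjoon/유형별/DFS,BFS/2606_바이러스.py | DFS
-- ===== SOURCE A (Python) =====
-- def DFS(stk, computers, visited, n):
--     count = 1
--     i = stk.pop()
--     visited[i] = True
--     for j in range(n):
--         if computers[i][j] == 1 and i != j and visited[j] == False:
--             stk.append(j)
--             count += DFS(stk, computers, visited, n)
--     return count
-- ===== SOURCE B (Python) =====
-- def DFS(stk, computers, visited, n):
--     # Iterative DFS with an explicit local stack; pops exactly one start from stk
--     # and mutates visited the same way as the recursive version.
--     i = stk.pop()
--     visited[i] = True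
--     count = 1
--     local = [j for j in reversed(range(n)) if computers[i][j] == 1 and i != j]
--     while local:
--         j = local.pop()
--         if not visited[j]:
--             visited[j] = True
--             count += 1
--             for k in reversed(range(n)):
--                 if computers[j][k] == 1 and j != k:
--                     local.append(k)
--     return count
-- ===== Notes on version B (the rewrite author's own statement) =====
-- stated objective: alternative
-- what changed: A's recursive DFS (one Python call frame per newly visited node) is replaced by an iterative DFS that keeps an explicit local worklist stack and checks visited on pop; only the one start element is popped from the caller's stk.
-- outside the precondition, e.g. on DFS([0], [[0, 0, 0]], [False], 3): A returns 1, B returns 1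
import Mathlib
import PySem

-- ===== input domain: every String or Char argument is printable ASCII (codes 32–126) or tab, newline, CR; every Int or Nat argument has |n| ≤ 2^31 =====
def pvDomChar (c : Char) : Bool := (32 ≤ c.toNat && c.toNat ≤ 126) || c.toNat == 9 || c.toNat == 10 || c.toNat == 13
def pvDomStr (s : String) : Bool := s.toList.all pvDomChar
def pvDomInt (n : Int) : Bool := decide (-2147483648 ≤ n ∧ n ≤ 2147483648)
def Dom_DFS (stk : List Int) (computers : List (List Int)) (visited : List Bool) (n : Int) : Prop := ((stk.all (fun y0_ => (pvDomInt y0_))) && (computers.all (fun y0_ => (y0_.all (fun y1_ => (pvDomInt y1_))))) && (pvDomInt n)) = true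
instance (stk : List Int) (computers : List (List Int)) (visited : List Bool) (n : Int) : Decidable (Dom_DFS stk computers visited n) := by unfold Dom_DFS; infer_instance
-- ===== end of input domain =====

-- B replaces A's recursive DFS by an iterative DFS over an explicit local worklist stack
-- (objective: alternative decomposition, no speed claim). Both A and B mutate their
-- arguments identically (pop one element from stk, set visited flags); the equivalence
-- proved here is about the RETURN value.

-- number of still-unvisited flags; the termination measure of B's loop
def pvCF (v : List Bool) : Nat := v.countP (fun b => !b)

-- visited[j] read as Python does (default `true` is never reached inside Pre_)
-- and marking: pvCF strictly drops when an unvisited index is marked.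
theorem pvCF_set_lt (v : List Bool) (k : Nat) (h : v[k]? = some false) :
    pvCF (v.set k true) < pvCF v := by
  induction v generalizing k with
  | nil => simp at h
  | cons a tl ih =>
    cases k with
    | zero =>
      have : a = false := by simpa using h
      subst this; simp [pvCF]
    | succ k =>
      have := ih k (by simpa using h)
      simp only [List.set, pvCF, List.countP_cons] at *
      omega

theorem pvCF_mark_lt (v : List Bool) (j : Int) (h : PySem.List.pyGetD v j true = false) :
    pvCF (PySem.List.pySetD v j true) < pvCF v := by
  cases e : PySem.List.pyIdx? v.length j with
  | none => simp [PySem.List.pyGetD, PySem.List.pyGet?, e] at h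
  | some k =>
    have hk : v[k]? = some false := by
      cases e2 : v[k]? with
      | none => simp [PySem.List.pyGetD, PySem.List.pyGet?, e, e2] at h
      | some b => simp [PySem.List.pyGetD, PySem.List.pyGet?, e, e2] at h; simp [h]
    simp only [PySem.List.pySetD, PySem.List.pySet?, e, Option.map_some, Option.getD_some]
    exact pvCF_set_lt v k hk

-- ===== PORT A =====
-- computers[i][j] == 1 (defaults are never reached inside Pre_)
def pvEdge (computers : List (List Int)) (i j : Int) : Bool :=
  PySem.List.pyGetD (PySem.List.pyGetD computers i []) j 0 == 1

-- A's recursion, transliterated.  `stk.append(j)` immediately followed by the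
-- recursive call's `stk.pop()` passes j to the recursive call, so the port passes
-- the popped index directly.  The fuel argument only makes the recursion structurally
-- total; the top-level call supplies visited.length + 1, which never runs out
-- (the recursion depth is bounded by the number of unvisited flags).
mutual
def pvAgo (computers : List (List Int)) (n : Int) : Nat → Int → List Bool → Int × List Bool
  | 0, _, v => (0, v)                                   -- fuel exhausted (unreachable from the top-level call)
  | fuel+1, i, v =>
      let v1 := PySem.List.pySetD v i true              -- visited[i] = True
      let r := pvAloop computers n fuel i (PySem.List.pyRange 0 n 1) v1
      (1 + r.1, r.2)                                    -- count = 1 + sum of recursive counts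
  termination_by fuel _ _ => (fuel, 0)
def pvAloop (computers : List (List Int)) (n : Int) : Nat → Int → List Int → List Bool → Int × List Bool
  | _, _, [], v => (0, v)
  | fuel, i, j :: js, v =>
      if pvEdge computers i j && !(i == j) && (PySem.List.pyGetD v j true == false) then
        let r1 := pvAgo computers n fuel j v            -- count += DFS(stk, …) with j on top of stk
        let r2 := pvAloop computers n fuel i js r1.2
        (r1.1 + r2.1, r2.2)
      else pvAloop computers n fuel i js v
  termination_by fuel _ js _ => (fuel, js.length + 1)
end

def DFS (stk : List Int) (computers : List (List Int)) (visited : List Bool) (n : Int) : Int :=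
  let i := PySem.List.pyGetD stk (-1) 0                 -- i = stk.pop() (stk ≠ [] inside Pre_)
  (pvAgo computers n (visited.length + 1) i visited).1

-- ===== PORT B =====
-- Source B pushes neighbours with `for k in reversed(range(n))` and pops from the END of
-- the Python list, so the stack with its top at the HEAD holds the candidates in
-- increasing order: the pushes of one node are this filter prepended to the stack.
def pvNbrs (computers : List (List Int)) (n : Int) (i : Int) : List Int :=
  (PySem.List.pyRange 0 n 1).filter (fun j => pvEdge computers i j && !(i == j))

-- Source B's `while local:` loop; head of the list = top of the stack.
def pvBloop (computers : List (List Int)) (n : Int) : List Int → List Bool → Int × List Bool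
  | [], v => (0, v)
  | j :: rest, v =>
      if h : PySem.List.pyGetD v j true then pvBloop computers n rest v   -- if not visited[j]: (else skip)
      else
        let v1 := PySem.List.pySetD v j true            -- visited[j] = True
        let r := pvBloop computers n (pvNbrs computers n j ++ rest) v1
        (r.1 + 1, r.2)                                  -- count += 1
  termination_by stack v => (pvCF v, stack.length)
  decreasing_by
  · exact Prod.Lex.right _ (Nat.lt_succ_self _)
  · exact Prod.Lex.left _ _ (pvCF_mark_lt v j (by simpa using h))

def DFS_alt (stk : List Int) (computers : List (List Int)) (visited : List Bool) (n : Int) : Int :=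
  let i := PySem.List.pyGetD stk (-1) 0                 -- i = stk.pop()
  let v1 := PySem.List.pySetD visited i true            -- visited[i] = True; count = 1
  1 + (pvBloop computers n (pvNbrs computers n i) v1).1

-- ===== PRECONDITION & SPEC =====
-- Pre_ restricts to shapes where every index access of the run is in range (the start
-- index valid for visited — and, when n > 0, for computers — and n ≤ the length of
-- visited, computers and every row); this excludes some inputs on which A happens to
-- return because no edge ever reaches an out-of-range index (see the cite), and all
-- inputs on which A raises IndexError.
def Pre_DFS (stk : List Int) (computers : List (List Int)) (visited : List Bool) (n : Int) : Prop :=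
  stk ≠ [] ∧
  (let i := stk.getLastD 0
   (-(visited.length : Int) ≤ i ∧ i < (visited.length : Int)) ∧
   (0 < n →
     (-(computers.length : Int) ≤ i ∧ i < (computers.length : Int)) ∧
     n ≤ (visited.length : Int) ∧ n ≤ (computers.length : Int) ∧
     ∀ row ∈ computers, n ≤ (row.length : Int)))
instance (stk : List Int) (computers : List (List Int)) (visited : List Bool) (n : Int) : Decidable (Pre_DFS stk computers visited n) := by unfold Pre_DFS; infer_instance

def pvWitness_DFS : List Int × List (List Int) × List Bool × Int := ([0], [[0, 1], [1, 0]], [false, false], 2)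

def Spec_DFS (stk : List Int) (computers : List (List Int)) (visited : List Bool) (n : Int) (out : Int) : Prop := out = DFS_alt stk computers visited n
instance (stk : List Int) (computers : List (List Int)) (visited : List Bool) (n : Int) (out : Int) : Decidable (Spec_DFS stk computers visited n out) := by unfold Spec_DFS; infer_instance

-- ===== CLAIM (what is proved, stated in full; the proofs are below) =====
def Claim_equal_DFS : Prop := ∀ (stk : List Int) (computers : List (List Int)) (visited : List Bool) (n : Int), Dom_DFS stk computers visited n → Pre_DFS stk computers visited n → Spec_DFS stk computers visited n (DFS stk computers visited n)

-- ===== LEMMAS AND PROOFS =====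

theorem pvCF_set_le (v : List Bool) (k : Nat) : pvCF (v.set k true) ≤ pvCF v := by
  induction v generalizing k with
  | nil => simp
  | cons a tl ih =>
    cases k with
    | zero => cases a <;> simp [pvCF]
    | succ k =>
      have := ih k
      simp only [List.set, pvCF, List.countP_cons] at *
      omega

theorem pvCF_mark_le (v : List Bool) (j : Int) :
    pvCF (PySem.List.pySetD v j true) ≤ pvCF v := by
  cases e : PySem.List.pyIdx? v.length j with
  | none => simp [PySem.List.pySetD, PySem.List.pySet?, e]
  | some k =>
    simp only [PySem.List.pySetD, PySem.List.pySet?, e, Option.map_some, Option.getD_some]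
    exact pvCF_set_le v k

-- A's exploration never un-marks a flag: pvCF only decreases.
theorem pvA_cf (c : List (List Int)) (n : Int) (fuel : Nat) :
    (∀ i v, pvCF (pvAgo c n fuel i v).2 ≤ pvCF v) ∧
    (∀ i js v, pvCF (pvAloop c n fuel i js v).2 ≤ pvCF v) := by
  induction fuel with
  | zero =>
    have hago : ∀ (i : Int) (v : List Bool), pvCF (pvAgo c n 0 i v).2 ≤ pvCF v := by
      intro i v; simp [pvAgo]
    refine ⟨hago, ?_⟩
    intro i js
    induction js with
    | nil => intro v; simp [pvAloop]
    | cons j js ih =>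
      intro v
      rw [pvAloop]
      split
      · exact le_trans (ih _) (hago _ _)
      · exact ih v
  | succ f ihf =>
    have hago : ∀ (i : Int) (v : List Bool), pvCF (pvAgo c n (f+1) i v).2 ≤ pvCF v := by
      intro i v
      simp only [pvAgo]
      exact le_trans (ihf.2 _ _ _) (pvCF_mark_le v i)
    refine ⟨hago, ?_⟩
    intro i js
    induction js with
    | nil => intro v; simp [pvAloop]
    | cons j js ih =>
      intro v
      rw [pvAloop]
      split
      · exact le_trans (ih _) (hago _ _)
      · exact ih v

theorem pvCF_pos_of_unvisited (v : List Bool) (j : Int)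
    (h : PySem.List.pyGetD v j true = false) : 1 ≤ pvCF v := by
  have := pvCF_mark_lt v j h
  omega

-- SIMULATION: consuming a pushed segment of B's stack does exactly what A's inner
-- loop over the same candidate indices does, then continues with the rest.
theorem pvSIM (c : List (List Int)) (n : Int) :
    ∀ (fuel : Nat) (js : List Int) (i : Int) (v : List Bool) (rest : List Int),
      pvCF v ≤ fuel →
      pvBloop c n (js.filter (fun j => pvEdge c i j && !(i == j)) ++ rest) v
        = ((pvAloop c n fuel i js v).1 + (pvBloop c n rest (pvAloop c n fuel i js v).2).1,
           (pvBloop c n rest (pvAloop c n fuel i js v).2).2) := by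
  intro fuel
  induction fuel with
  | zero =>
    intro js
    induction js with
    | nil => intro i v rest _; simp [pvAloop]
    | cons j js ih =>
      intro i v rest hv
      by_cases he : pvEdge c i j && !(i == j)
      · by_cases hvj : PySem.List.pyGetD v j true
        · rw [List.filter_cons, if_pos he, List.cons_append, pvBloop, dif_pos hvj, pvAloop]
          rw [if_neg (by simp [he, hvj])]
          exact ih i v rest hv
        · exact absurd hv (by have := pvCF_pos_of_unvisited v j (by simpa using hvj); omega)
      · rw [List.filter_cons, if_neg he, pvAloop]
        rw [if_neg (by simp_all)]
        exact ih i v rest hv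
  | succ f ihf =>
    intro js
    induction js with
    | nil => intro i v rest _; simp [pvAloop]
    | cons j js ih =>
      intro i v rest hv
      by_cases he : pvEdge c i j && !(i == j)
      · by_cases hvj : PySem.List.pyGetD v j true
        · rw [List.filter_cons, if_pos he, List.cons_append, pvBloop, dif_pos hvj, pvAloop]
          rw [if_neg (by simp [he, hvj])]
          exact ih i v rest hv
        · -- B pops an unvisited j: marks it, pushes its candidates; A recurses into j.
          have hvj' : PySem.List.pyGetD v j true = false := by simpa using hvj
          rw [List.filter_cons, if_pos he, List.cons_append, pvBloop, dif_neg hvj, pvAloop]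
          rw [if_pos (by simp [he, hvj'])]
          simp only [pvAgo, pvNbrs]
          have h1 : pvCF (PySem.List.pySetD v j true) ≤ f := by
            have := pvCF_mark_lt v j hvj'
            omega
          rw [ihf (PySem.List.pyRange 0 n 1) j (PySem.List.pySetD v j true)
                (js.filter (fun j' => pvEdge c i j' && !(i == j')) ++ rest) h1]
          have h2 : pvCF (pvAloop c n f j (PySem.List.pyRange 0 n 1)
              (PySem.List.pySetD v j true)).2 ≤ f + 1 := by
            have := (pvA_cf c n f).2 j (PySem.List.pyRange 0 n 1) (PySem.List.pySetD v j true)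
            omega
          rw [ih i _ rest h2]
          simp only [Prod.mk.injEq]
          exact ⟨by omega, trivial⟩
      · rw [List.filter_cons, if_neg he, pvAloop]
        rw [if_neg (by simp_all)]
        exact ih i v rest hv

-- ===== VERDICT (by name: the statement is the Claim_ definition above) =====
theorem DFS_spec : Claim_equal_DFS := by
  intro stk c v n _hdom _hpre
  show DFS stk c v n = DFS_alt stk c v n
  unfold DFS DFS_alt
  simp only [pvAgo]
  have h1 : pvCF (PySem.List.pySetD v (PySem.List.pyGetD stk (-1) 0) true) ≤ v.length := by
    have h2 : pvCF (PySem.List.pySetD v (PySem.List.pyGetD stk (-1) 0) true)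
        ≤ (PySem.List.pySetD v (PySem.List.pyGetD stk (-1) 0) true).length :=
      List.countP_le_length
    simpa [PySem.List.length_pySetD] using h2
  have := pvSIM c n v.length (PySem.List.pyRange 0 n 1) (PySem.List.pyGetD stk (-1) 0)
    (PySem.List.pySetD v (PySem.List.pyGetD stk (-1) 0) true) [] h1
  rw [pvNbrs, ← List.append_nil ((PySem.List.pyRange 0 n 1).filter _), this]
  simp [pvBloop]
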